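-- pv_equiv track=rewrite | github.com/andrewhead/scholarphi-definition-detector | eval_utils.py | simplify_tokens
-- ===== SOURCE A (Python) =====
-- def simplify_tokens(preds, type_=None):
--     simple_preds = []
--     if type_ is None:
--         for p in preds:
--             if p.endswith('TERM'):
--                 simple_preds.append('TERM')
--             elif p.endswith('DEF'):
--                 simple_preds.append('DEF')
--             else:
--                 simple_preds.append(p)
--     elif type_ in ['term', 'symbol']:
--         for p in preds:
--             if p.endswith('TERM'):
--                 simple_preds.append('TERM')
--             elif p.endswith('DEF'):
--                 simple_preds.append('DEF')
--             else:
--                 simple_preds.append(p)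
--     elif type_=='abbreviation':
--         for p in preds:
--             if p.endswith('short'):
--                 simple_preds.append('ABBR')
--             elif p.endswith('long'):
--                 simple_preds.append('EXP')
--             else:
--                 simple_preds.append(p)
--
--     return simple_preds
-- ===== SOURCE B (Python) =====
-- def simplify_tokens(preds, type_=None):
--     # Unrecognized explicit type: A's quirk, empty result regardless of preds.
--     if type_ is not None and type_ not in ('term', 'symbol', 'abbreviation'):
--         return []
--     if type_ == 'abbreviation':
--         s1, t1, s2, t2 = 'short', 'ABBR', 'long', 'EXP'
--     else:
--         s1, t1, s2, t2 = 'TERM', 'TERM', 'DEF', 'DEF'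
--     # Stage 1: rewrite every first-suffix match across the whole list.
--     stage1 = [t1 if p.endswith(s1) else p for p in preds]
--     # Stage 2: rewrite every second-suffix match in the intermediate list.
--     # Safe because neither produced tag ends with the second suffix.
--     return [t2 if p.endswith(s2) else p for p in stage1]
-- ===== Notes on version B (the rewrite author's own statement) =====
-- stated objective: alternative
-- what changed: Replaces A's three branch-specific single passes (per-element if/elif chains) by two staged whole-list rewriting passes: first every match of the first suffix is rewritten across the list, then a second pass over that intermediate list rewrites the second suffix (safe because no produced tag ends with the second suffix).
import Mathlib
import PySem

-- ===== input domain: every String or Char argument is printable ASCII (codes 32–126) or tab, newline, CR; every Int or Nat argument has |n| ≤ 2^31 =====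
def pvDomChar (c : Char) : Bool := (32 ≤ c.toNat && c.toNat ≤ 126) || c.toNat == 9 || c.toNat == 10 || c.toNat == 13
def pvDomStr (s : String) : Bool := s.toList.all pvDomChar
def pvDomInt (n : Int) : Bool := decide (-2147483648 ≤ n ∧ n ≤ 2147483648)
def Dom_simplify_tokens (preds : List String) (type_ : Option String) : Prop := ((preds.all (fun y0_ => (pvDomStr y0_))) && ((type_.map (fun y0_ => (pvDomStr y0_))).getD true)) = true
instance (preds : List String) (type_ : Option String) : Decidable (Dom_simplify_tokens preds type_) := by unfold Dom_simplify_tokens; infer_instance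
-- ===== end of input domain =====

-- B replaces A's three branch-specific single passes by two staged whole-list
-- rewriting passes (first suffix everywhere, then second suffix on the result);
-- objective: alternative decomposition, same cost.

-- ===== PORT A =====
def pvLoopTD (preds : List String) : List String :=
  match preds with
  | [] => []
  | p :: rest =>
    (if PySem.Str.endswith p "TERM" then "TERM"
     else if PySem.Str.endswith p "DEF" then "DEF"
     else p) :: pvLoopTD rest

def pvLoopSL (preds : List String) : List String :=
  match preds with
  | [] => []
  | p :: rest =>
    (if PySem.Str.endswith p "short" then "ABBR"
     else if PySem.Str.endswith p "long" then "EXP"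
     else p) :: pvLoopSL rest

-- Port of A: three branch-specific loops (the None and term/symbol loops are identical in A).
def simplify_tokens (preds : List String) (type_ : Option String) : List String :=
  match type_ with
  | none => pvLoopTD preds
  | some t =>
    if t == "term" || t == "symbol" then pvLoopTD preds
    else if t == "abbreviation" then pvLoopSL preds
    else []

-- ===== PORT B =====
-- one staged pass: rewrite every match of one suffix across the whole list
def pvStage (suffix tag : String) (xs : List String) : List String :=
  xs.map (fun p => if PySem.Str.endswith p suffix then tag else p)

-- Port of B: two staged whole-list passes after validating type_.
def simplify_tokens_alt (preds : List String) (type_ : Option String) : List String :=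
  if (match type_ with
      | none => false
      | some t => !(t == "term" || t == "symbol" || t == "abbreviation")) then []
  else
    let r := if type_ == some "abbreviation"
             then ("short", "ABBR", "long", "EXP")
             else ("TERM", "TERM", "DEF", "DEF")
    pvStage r.2.2.1 r.2.2.2 (pvStage r.1 r.2.1 preds)

-- ===== PRECONDITION & SPEC =====
def Spec_simplify_tokens (preds : List String) (type_ : Option String) (out : List String) : Prop := out = simplify_tokens_alt preds type_
instance (preds : List String) (type_ : Option String) (out : List String) : Decidable (Spec_simplify_tokens preds type_ out) := by unfold Spec_simplify_tokens; infer_instance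

-- ===== CLAIM (what is proved, stated in full; the proofs are below) =====
def Claim_equal_simplify_tokens : Prop := ∀ (preds : List String) (type_ : Option String), Dom_simplify_tokens preds type_ → Spec_simplify_tokens preds type_ (simplify_tokens preds type_)

-- ===== LEMMAS AND PROOFS =====

lemma pvStage_td (preds : List String) :
    pvStage "DEF" "DEF" (pvStage "TERM" "TERM" preds) = pvLoopTD preds := by
  induction preds with
  | nil => rfl
  | cons p rest ih =>
    simp only [pvStage, List.map, pvLoopTD, PySem.Str.endswith] at *
    rw [ih]
    by_cases h1 : PySem.Chars.endswith p.toList ['T', 'E', 'R', 'M'] = true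
    · simp [h1, show PySem.Chars.endswith ['T', 'E', 'R', 'M'] ['D', 'E', 'F'] = false by decide]
    · simp [h1]

lemma pvStage_sl (preds : List String) :
    pvStage "long" "EXP" (pvStage "short" "ABBR" preds) = pvLoopSL preds := by
  induction preds with
  | nil => rfl
  | cons p rest ih =>
    simp only [pvStage, List.map, pvLoopSL, PySem.Str.endswith] at *
    rw [ih]
    by_cases h1 : PySem.Chars.endswith p.toList ['s', 'h', 'o', 'r', 't'] = true
    · simp [h1, show PySem.Chars.endswith ['A', 'B', 'B', 'R'] ['l', 'o', 'n', 'g'] = false by decide]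
    · simp [h1]

-- ===== VERDICT (by name: the statement is the Claim_ definition above) =====
theorem simplify_tokens_spec : Claim_equal_simplify_tokens := by
  intro preds type_ _
  unfold Spec_simplify_tokens simplify_tokens simplify_tokens_alt
  cases type_ with
  | none => simp [pvStage_td]
  | some t =>
    by_cases h1 : (t == "term" || t == "symbol") = true
    · have ht : ¬ (t == "abbreviation") = true := by
        rcases Bool.or_eq_true_iff.mp h1 with h | h <;> simp_all
      simp [h1, ht, pvStage_td]
    · by_cases h2 : (t == "abbreviation") = true
      · have := beq_iff_eq.mp h2
        simp [this, pvStage_sl]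
      · simp [h1, h2]
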